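-- pv_equiv track=rewrite | github.com/JacobAraujo/Fluxo-em-Redes | problema-de-transporte.py | formatarCiclo
-- ===== SOURCE A (Python) =====
-- def arestaParaModelo(aresta):
--     if aresta[0][0] == 'a':
--         return [aresta[0][1], aresta[1][1]]
--     else:
--         return [aresta[1][1], aresta[0][1]]
--
-- def cicloFormatarij(ciclo):
--     cicloFormatoij = []
--     for aresta in ciclo:
--         cicloFormatoij += [arestaParaModelo(aresta)]
--     return cicloFormatoij
--
-- def formatarCiclo(ciclo, arestaInicial):
--     cicloFormatoij = cicloFormatarij(ciclo)
--     cicloFormatado = []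
--     flag = False
--     for aresta in cicloFormatoij:
--         if aresta == arestaInicial:
--             flag = True
--         if flag:
--             cicloFormatado += [aresta]
--     for aresta in cicloFormatoij:
--         if aresta == arestaInicial:
--             break
--         cicloFormatado += [aresta]
--     return cicloFormatado
-- ===== SOURCE B (Python) =====
-- def formatarCiclo(ciclo, arestaInicial):
--     def fmt(a):
--         return [a[0][1], a[1][1]] if a[0][0] == 'a' else [a[1][1], a[0][1]]
--     xs = [fmt(a) for a in ciclo]
--     i = xs.index(arestaInicial) if arestaInicial in xs else 0
--     return xs[i:] + xs[:i]
-- ===== Notes on version B (the rewrite author's own statement) =====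
-- stated objective: idiomatic
-- what changed: Replaces the two flag-driven accumulation loops with locating the pivot once via a guarded list.index and rotating with a single slice expression xs[i:] + xs[:i]; the i=0 fallback reproduces the whole-list result when the edge is absent.
import Mathlib
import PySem

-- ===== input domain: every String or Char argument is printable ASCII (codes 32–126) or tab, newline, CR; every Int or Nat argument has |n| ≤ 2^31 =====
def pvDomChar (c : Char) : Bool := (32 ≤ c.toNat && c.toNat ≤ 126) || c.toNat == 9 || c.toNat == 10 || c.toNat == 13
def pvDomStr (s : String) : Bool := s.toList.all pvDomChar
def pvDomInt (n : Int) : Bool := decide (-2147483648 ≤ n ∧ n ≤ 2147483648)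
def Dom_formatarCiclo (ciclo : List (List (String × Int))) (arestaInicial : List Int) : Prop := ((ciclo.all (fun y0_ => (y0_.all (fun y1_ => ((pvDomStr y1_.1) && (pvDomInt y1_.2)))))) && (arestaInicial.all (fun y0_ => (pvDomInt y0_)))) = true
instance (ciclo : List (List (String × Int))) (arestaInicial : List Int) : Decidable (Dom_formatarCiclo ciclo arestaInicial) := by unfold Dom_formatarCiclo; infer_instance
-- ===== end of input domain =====

-- B replaces A's two flag-driven passes by a guarded index lookup and a one-expression
-- slice rotation (idiomatic; same asymptotic cost).

-- ===== PORT A =====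
def arestaParaModelo (aresta : List (String × Int)) : List Int :=
  -- aresta[0] / aresta[1]: IndexError (none) when the edge has fewer than 2 entries; Pre_ excludes that
  match PySem.List.pyGet? aresta 0, PySem.List.pyGet? aresta 1 with
  | some p0, some p1 => if p0.1 == "a" then [p0.2, p1.2] else [p1.2, p0.2]
  | _, _ => []

def cicloFormatarij (ciclo : List (List (String × Int))) : List (List Int) :=
  ciclo.foldl (fun acc aresta => acc ++ [arestaParaModelo aresta]) []

-- first loop of A: flag turns true at the first occurrence, then every edge is appended
def fcLoop1 (xs : List (List Int)) (t : List Int) (acc : List (List Int)) (flag : Bool) : List (List Int) :=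
  match xs with
  | [] => acc
  | a :: rest =>
    let flag' := if a == t then true else flag
    fcLoop1 rest t (if flag' then acc ++ [a] else acc) flag'

-- second loop of A: append until the first occurrence (break)
def fcLoop2 (xs : List (List Int)) (t : List Int) (acc : List (List Int)) : List (List Int) :=
  match xs with
  | [] => acc
  | a :: rest => if a == t then acc else fcLoop2 rest t (acc ++ [a])

def formatarCiclo (ciclo : List (List (String × Int))) (arestaInicial : List Int) : List (List Int) :=
  let cicloFormatoij := cicloFormatarij ciclo
  fcLoop2 cicloFormatoij arestaInicial (fcLoop1 cicloFormatoij arestaInicial [] false)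

-- ===== PORT B =====
def fmtEdge (a : List (String × Int)) : List Int :=
  match PySem.List.pyGet? a 0, PySem.List.pyGet? a 1 with
  | some p0, some p1 => if p0.1 == "a" then [p0.2, p1.2] else [p1.2, p0.2]
  | _, _ => []

def formatarCiclo_alt (ciclo : List (List (String × Int))) (arestaInicial : List Int) : List (List Int) :=
  let xs := ciclo.map fmtEdge
  let i : Int := if xs.contains arestaInicial then ((PySem.List.index? xs arestaInicial).getD 0 : Nat) else 0
  PySem.List.slice xs (some i) none ++ PySem.List.slice xs none (some i)

-- ===== PRECONDITION & SPEC =====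
-- A (and B) raise IndexError on any edge with fewer than 2 endpoints; Pre_ excludes exactly those.
def Pre_formatarCiclo (ciclo : List (List (String × Int))) (arestaInicial : List Int) : Prop :=
  ∀ aresta ∈ ciclo, 2 ≤ aresta.length
instance (ciclo : List (List (String × Int))) (arestaInicial : List Int) : Decidable (Pre_formatarCiclo ciclo arestaInicial) := by unfold Pre_formatarCiclo; infer_instance
def pvWitness_formatarCiclo : (List (List (String × Int))) × List Int :=
  ([[("a", 1), ("b", 2)], [("c", 3), ("a", 4)]], [4, 3])

def Spec_formatarCiclo (ciclo : List (List (String × Int))) (arestaInicial : List Int) (out : List (List Int)) : Prop := out = formatarCiclo_alt ciclo arestaInicial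
instance (ciclo : List (List (String × Int))) (arestaInicial : List Int) (out : List (List Int)) : Decidable (Spec_formatarCiclo ciclo arestaInicial out) := by unfold Spec_formatarCiclo; infer_instance

-- ===== CLAIM (what is proved, stated in full; the proofs are below) =====
def Claim_equal_formatarCiclo : Prop := ∀ (ciclo : List (List (String × Int))) (arestaInicial : List Int), Dom_formatarCiclo ciclo arestaInicial → Pre_formatarCiclo ciclo arestaInicial → Spec_formatarCiclo ciclo arestaInicial (formatarCiclo ciclo arestaInicial)

-- ===== LEMMAS AND PROOFS =====

theorem fmtEdge_eq : fmtEdge = arestaParaModelo := rfl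

theorem cicloFormatarij_eq (ciclo : List (List (String × Int))) :
    cicloFormatarij ciclo = ciclo.map arestaParaModelo := by
  have h : ∀ (l : List (List (String × Int))) (acc : List (List Int)),
      l.foldl (fun acc aresta => acc ++ [arestaParaModelo aresta]) acc = acc ++ l.map arestaParaModelo := by
    intro l
    induction l with
    | nil => simp
    | cons a l ih => intro acc; simp [List.foldl, ih]
  unfold cicloFormatarij
  rw [h ciclo []]
  simp

theorem fcLoop1_true (xs : List (List Int)) (t : List Int) (acc : List (List Int)) :
    fcLoop1 xs t acc true = acc ++ xs := by
  induction xs generalizing acc with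
  | nil => simp [fcLoop1]
  | cons a rest ih => simp [fcLoop1, ih]

theorem fcLoop1_false (xs : List (List Int)) (t : List Int) (acc : List (List Int)) :
    fcLoop1 xs t acc false = acc ++ xs.dropWhile (fun a => !(a == t)) := by
  induction xs generalizing acc with
  | nil => simp [fcLoop1]
  | cons a rest ih =>
    by_cases h : a = t
    · subst h; simp [fcLoop1, List.dropWhile, fcLoop1_true]
    · have hb : (a == t) = false := by simp [h]
      simp [fcLoop1, List.dropWhile, hb, ih]

theorem fcLoop2_eq (xs : List (List Int)) (t : List Int) (acc : List (List Int)) :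
    fcLoop2 xs t acc = acc ++ xs.takeWhile (fun a => !(a == t)) := by
  induction xs generalizing acc with
  | nil => simp [fcLoop2]
  | cons a rest ih =>
    by_cases h : a = t
    · subst h; simp [fcLoop2, List.takeWhile]
    · have hb : (a == t) = false := by simp [h]
      simp [fcLoop2, List.takeWhile, hb, ih]

theorem takeWhile_length_eq_index (xs : List (List Int)) (t : List Int) (h : t ∈ xs) :
    PySem.List.index? xs t = some (xs.takeWhile (fun a => !(a == t))).length := by
  induction xs with
  | nil => simp at h
  | cons a rest ih =>
    by_cases ha : a = t
    · subst ha
      rw [PySem.List.index?_cons_self]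
      simp [List.takeWhile]
    · have hb : (a == t) = false := by simp [ha]
      have hm : t ∈ rest := by
        rcases List.mem_cons.mp h with h | h
        · exact absurd h.symm ha
        · exact h
      rw [PySem.List.index?_cons_of_ne rest ha, ih hm]
      simp [List.takeWhile, hb]

theorem take_takeWhile_length {α : Type} (p : α → Bool) (xs : List α) :
    xs.take (xs.takeWhile p).length = xs.takeWhile p := by
  induction xs with
  | nil => simp
  | cons a rest ih =>
    by_cases h : p a
    · simp [List.takeWhile, h, ih]
    · simp [List.takeWhile, h]

theorem drop_takeWhile_length {α : Type} (p : α → Bool) (xs : List α) :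
    xs.drop (xs.takeWhile p).length = xs.dropWhile p := by
  induction xs with
  | nil => simp
  | cons a rest ih =>
    by_cases h : p a
    · simp [List.takeWhile, List.dropWhile, h, ih]
    · simp [List.takeWhile, List.dropWhile, h]

theorem takeWhile_of_not_mem (xs : List (List Int)) (t : List Int) (h : t ∉ xs) :
    xs.takeWhile (fun a => !(a == t)) = xs := by
  induction xs with
  | nil => simp
  | cons a rest ih =>
    have ha : a ≠ t := fun he => h (by simp [he])
    have hm : t ∉ rest := fun hm => h (by simp [hm])
    have hb : (a == t) = false := by simp [ha]
    simp [List.takeWhile, hb, ih hm]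

theorem dropWhile_of_not_mem (xs : List (List Int)) (t : List Int) (h : t ∉ xs) :
    xs.dropWhile (fun a => !(a == t)) = [] := by
  induction xs with
  | nil => simp
  | cons a rest ih =>
    have ha : a ≠ t := fun he => h (by simp [he])
    have hm : t ∉ rest := fun hm => h (by simp [hm])
    have hb : (a == t) = false := by simp [ha]
    simp [List.dropWhile, hb, ih hm]

theorem rotate_eq (xs : List (List Int)) (t : List Int) :
    fcLoop2 xs t (fcLoop1 xs t [] false) =
    (let i : Int := if xs.contains t then ((PySem.List.index? xs t).getD 0 : Nat) else 0
     PySem.List.slice xs (some i) none ++ PySem.List.slice xs none (some i)) := by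
  rw [fcLoop1_false, fcLoop2_eq]
  by_cases hm : t ∈ xs
  · have hc : xs.contains t = true := by simpa using hm
    rw [takeWhile_length_eq_index xs t hm]
    simp only [hc, if_true, Option.getD_some,
      PySem.List.slice_from_natCast, PySem.List.slice_to_natCast,
      take_takeWhile_length, drop_takeWhile_length]
    simp
  · have hc : xs.contains t = false := by simpa using hm
    rw [takeWhile_of_not_mem xs t hm, dropWhile_of_not_mem xs t hm]
    simp only [hc, Bool.false_eq_true, if_false]
    rw [show (0:Int) = ((0:Nat):Int) from rfl,
      PySem.List.slice_from_natCast, PySem.List.slice_to_natCast]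
    simp

-- ===== VERDICT (by name: the statement is the Claim_ definition above) =====
theorem formatarCiclo_spec : Claim_equal_formatarCiclo := by
  intro ciclo arestaInicial _ _
  unfold Spec_formatarCiclo formatarCiclo formatarCiclo_alt
  rw [cicloFormatarij_eq, fmtEdge_eq]
  exact rotate_eq (ciclo.map arestaParaModelo) arestaInicial
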